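-- pv_equiv track=rewrite | github.com/cfleisig/Gomku | gomku.py | len_seq_and_end_coor
-- ===== SOURCE A (Python) =====
-- def len_seq_and_end_coor(squares_with_col, d_y, d_x):
--     '''
--     finds how long each sequence is and what its last coordinate is
--     '''
--     sequence_lengths = []
--     temp_seq_ends = []
--     count = 1
--
--     if len(squares_with_col) != 0:
--         previous_tuple = squares_with_col[0]
--
--         for i in range(1, len(squares_with_col)):
--             predicted_previous_tuple = [squares_with_col[i][0] - d_y, squares_with_col[i][1] - d_x]
--             if previous_tuple != predicted_previous_tuple:
--                 temp_seq_ends.append(previous_tuple)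
--                 sequence_lengths.append(count)
--                 count = 1
--             else:
--                 count += 1
--             previous_tuple = squares_with_col[i]
--
--         temp_seq_ends.append(squares_with_col[-1])
--         sequence_lengths.append(count)
--     return temp_seq_ends, sequence_lengths
-- ===== SOURCE B (Python) =====
-- def len_seq_and_end_coor(squares_with_col, d_y, d_x):
--     '''
--     finds how long each sequence is and what its last coordinate is
--     (boundary-index decomposition: collect run-break indices, then derive
--     endpoints and lengths from them)
--     '''
--     n = len(squares_with_col)
--     if n == 0:
--         return [], []
--     boundaries = [i - 1 for i in range(1, n)
--                   if squares_with_col[i - 1] != [squares_with_col[i][0] - d_y,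
--                                                 squares_with_col[i][1] - d_x]]
--     boundaries.append(n - 1)
--     ends = [squares_with_col[b] for b in boundaries]
--     lengths = [b - p for p, b in zip([-1] + boundaries[:-1], boundaries)]
--     return ends, lengths
-- ===== Notes on version B (the rewrite author's own statement) =====
-- stated objective: alternative
-- what changed: B replaces A's stateful scan (carrying previous element, running count and two growing accumulators) by a boundary-index decomposition: one comprehension collects the run-break indices, then endpoints are lookups at the boundaries and run lengths are differences of consecutive boundaries.
import Mathlib
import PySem

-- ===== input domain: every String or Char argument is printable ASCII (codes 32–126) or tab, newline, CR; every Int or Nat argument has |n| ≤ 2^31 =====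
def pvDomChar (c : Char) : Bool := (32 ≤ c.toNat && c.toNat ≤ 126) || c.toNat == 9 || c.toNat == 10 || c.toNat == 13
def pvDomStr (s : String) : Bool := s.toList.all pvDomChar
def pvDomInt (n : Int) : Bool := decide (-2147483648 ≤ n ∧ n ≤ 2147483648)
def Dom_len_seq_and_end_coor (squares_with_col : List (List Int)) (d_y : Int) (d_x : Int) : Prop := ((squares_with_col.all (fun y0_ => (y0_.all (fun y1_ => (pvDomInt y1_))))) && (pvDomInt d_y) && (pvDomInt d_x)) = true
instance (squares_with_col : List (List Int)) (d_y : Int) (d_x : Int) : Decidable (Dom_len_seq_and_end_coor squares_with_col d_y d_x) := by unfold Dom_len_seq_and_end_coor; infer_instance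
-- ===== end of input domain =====

-- B re-derives the endpoints and run lengths from a single list of run-break indices instead of
-- A's stateful scan; same O(n) cost, different decomposition (objective: alternative).

-- ===== PORT A =====
-- A-side helper: the body of A's for-loop over i in range(1, len), acting on the state
-- (temp_seq_ends, sequence_lengths, count, previous_tuple).
def pvAStep (s : List (List Int)) (d_y : Int) (d_x : Int)
    (st : List (List Int) × List Int × Int × List Int) (i : Int) :
    List (List Int) × List Int × Int × List Int :=
  let cur := PySem.List.pyGetD s i []
  let predicted_previous_tuple :=
    [PySem.List.pyGetD cur 0 0 - d_y, PySem.List.pyGetD cur 1 0 - d_x]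
  if st.2.2.2 ≠ predicted_previous_tuple then
    (st.1 ++ [st.2.2.2], st.2.1 ++ [st.2.2.1], 1, cur)
  else
    (st.1, st.2.1, st.2.2.1 + 1, cur)

-- Literal transliteration of A: a fold of pvAStep over range(1, len).  Indexing
-- squares_with_col[i] and squares_with_col[i][0]/[1] uses pyGetD with a dummy default; under
-- Pre_ every such index is in range, so the default is never read (Python raises IndexError
-- exactly where Pre_ fails).
def len_seq_and_end_coor (squares_with_col : List (List Int)) (d_y : Int) (d_x : Int) : List (List Int) × List Int :=
  if squares_with_col.length ≠ 0 then
    let previous_tuple := PySem.List.pyGetD squares_with_col 0 []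
    let st := (PySem.List.pyRange 1 (squares_with_col.length : Int) 1).foldl
      (pvAStep squares_with_col d_y d_x) ([], [], 1, previous_tuple)
    (st.1 ++ [(PySem.List.pyGet? squares_with_col (-1)).getD []], st.2.1 ++ [st.2.2.1])
  else ([], [])

-- ===== PORT B =====
-- Literal transliteration of Source B: boundary indices by filter over range(1, n), then endpoints
-- by lookup at the boundaries and lengths by zipped differences of consecutive boundaries.
def len_seq_and_end_coor_alt (squares_with_col : List (List Int)) (d_y : Int) (d_x : Int) : List (List Int) × List Int :=
  let n : Int := squares_with_col.length
  if squares_with_col.length = 0 then ([], [])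
  else
    let boundaries :=
      ((PySem.List.pyRange 1 n 1).filter (fun i =>
        decide (PySem.List.pyGetD squares_with_col (i - 1) [] ≠
          [PySem.List.pyGetD (PySem.List.pyGetD squares_with_col i []) 0 0 - d_y,
           PySem.List.pyGetD (PySem.List.pyGetD squares_with_col i []) 1 0 - d_x]))).map
        (fun i => i - 1)
    let boundaries := boundaries ++ [n - 1]
    let ends := boundaries.map (fun b => PySem.List.pyGetD squares_with_col b [])
    let lengths := (List.zip ((-1) :: boundaries.dropLast) boundaries).map (fun pb => pb.2 - pb.1)
    (ends, lengths)

-- ===== PRECONDITION & SPEC =====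
-- Pre_ excludes exactly the inputs on which Python A raises IndexError: some element after the
-- first has fewer than two coordinates (A reads squares_with_col[i][0] and [i][1] for i >= 1).
def Pre_len_seq_and_end_coor (squares_with_col : List (List Int)) (d_y : Int) (d_x : Int) : Prop :=
  ∀ l ∈ squares_with_col.tail, 2 ≤ l.length
instance (squares_with_col : List (List Int)) (d_y : Int) (d_x : Int) : Decidable (Pre_len_seq_and_end_coor squares_with_col d_y d_x) := by unfold Pre_len_seq_and_end_coor; infer_instance
def pvWitness_len_seq_and_end_coor : List (List Int) × Int × Int := ([[0, 0], [1, 1], [5, 5]], 1, 1)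

def Spec_len_seq_and_end_coor (squares_with_col : List (List Int)) (d_y : Int) (d_x : Int) (out : List (List Int) × List Int) : Prop := out = len_seq_and_end_coor_alt squares_with_col d_y d_x
instance (squares_with_col : List (List Int)) (d_y : Int) (d_x : Int) (out : List (List Int) × List Int) : Decidable (Spec_len_seq_and_end_coor squares_with_col d_y d_x out) := by unfold Spec_len_seq_and_end_coor; infer_instance

-- ===== CLAIM (what is proved, stated in full; the proofs are below) =====
def Claim_equal_len_seq_and_end_coor : Prop := ∀ (squares_with_col : List (List Int)) (d_y : Int) (d_x : Int), Dom_len_seq_and_end_coor squares_with_col d_y d_x → Pre_len_seq_and_end_coor squares_with_col d_y d_x → Spec_len_seq_and_end_coor squares_with_col d_y d_x (len_seq_and_end_coor squares_with_col d_y d_x)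

-- ===== LEMMAS AND PROOFS =====

-- The "predicted previous" list both programs build from an element.
def pvPred (d_y d_x : Int) (cur : List Int) : List Int :=
  [PySem.List.pyGetD cur 0 0 - d_y, PySem.List.pyGetD cur 1 0 - d_x]

-- The runs of prev :: rest (prev sitting at index k), as (index of run end, run-end element).
def pvRuns (d_y d_x : Int) : List Int → List (List Int) → Int → List (Int × List Int)
  | prev, [], k => [(k, prev)]
  | prev, cur :: rest, k =>
      (if prev ≠ pvPred d_y d_x cur then [(k, prev)] else []) ++ pvRuns d_y d_x cur rest (k + 1)

-- Successive differences against a running previous value.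
def pvDiffs : Int → List Int → List Int
  | _, [] => []
  | p, b :: bs => (b - p) :: pvDiffs b bs

theorem pvDiffs_eq_zip (p : Int) (bs : List Int) :
    pvDiffs p bs = (List.zip (p :: bs.dropLast) bs).map (fun pb => pb.2 - pb.1) := by
  induction bs generalizing p with
  | nil => rfl
  | cons b bs ih =>
    cases bs with
    | nil => rfl
    | cons b' bs' =>
      simpa [pvDiffs, List.zip] using ih b

theorem pv_drop_getD {α : Type} (s : List α) (k : Nat) (prev : α) (rest : List α) (d : α)
    (h : s.drop k = prev :: rest) : s.getD k d = prev := by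
  have hk : s[k]? = some prev := by
    rw [← List.head?_drop, h]; rfl
  simp [List.getD, hk]

theorem pvAStep_eq (s : List (List Int)) (d_y d_x : Int)
    (st : List (List Int) × List Int × Int × List Int) (i : Int) :
    pvAStep s d_y d_x st i =
      if st.2.2.2 ≠ pvPred d_y d_x (PySem.List.pyGetD s i []) then
        (st.1 ++ [st.2.2.2], st.2.1 ++ [st.2.2.1], 1, PySem.List.pyGetD s i [])
      else
        (st.1, st.2.1, st.2.2.1 + 1, PySem.List.pyGetD s i []) := rfl

theorem pvA_loop (s : List (List Int)) (d_y d_x : Int) (rest : List (List Int)) :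
    ∀ (prev : List Int) (k : Nat) (ends : List (List Int)) (lens : List Int) (count : Int),
    s.drop k = prev :: rest →
    ((PySem.List.pyRange ((k : Int) + 1) (s.length : Int) 1).foldl
        (pvAStep s d_y d_x) (ends, lens, count, prev)).1
      ++ [(PySem.List.pyGet? s (-1)).getD []]
      = ends ++ (pvRuns d_y d_x prev rest (k : Int)).map Prod.snd
    ∧
    ((PySem.List.pyRange ((k : Int) + 1) (s.length : Int) 1).foldl
        (pvAStep s d_y d_x) (ends, lens, count, prev)).2.1
      ++ [((PySem.List.pyRange ((k : Int) + 1) (s.length : Int) 1).foldl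
        (pvAStep s d_y d_x) (ends, lens, count, prev)).2.2.1]
      = lens ++ pvDiffs ((k : Int) - count) ((pvRuns d_y d_x prev rest (k : Int)).map Prod.fst) := by
  induction rest with
  | nil =>
    intro prev k ends lens count h
    have hk : s.length = k + 1 := by
      have h1 := congrArg List.length h
      simp [List.length_drop] at h1
      omega
    have hn : (s.length : Int) = (k : Int) + 1 := by rw [hk]; push_cast; ring
    have hs := (List.take_append_drop k s).symm
    rw [h] at hs
    have hlast : PySem.List.pyGet? s (-1) = some prev := by
      rw [hs]; exact PySem.List.pyGet?_neg_one_append_singleton _ _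
    rw [hn, PySem.List.pyRange_one_eq_nil le_rfl]
    constructor
    · simp [pvRuns, hlast]
    · simp [pvRuns, pvDiffs, sub_sub_cancel]
  | cons cur rest' ih =>
    intro prev k ends lens count h
    have hlen : k + 2 ≤ s.length := by
      have h1 := congrArg List.length h
      simp [List.length_drop] at h1
      omega
    have hdrop : s.drop (k + 1) = cur :: rest' := by
      have h2 : s.drop (k + 1) = (s.drop k).drop 1 := by
        rw [List.drop_drop]
      rw [h2, h]; rfl
    have hcur : PySem.List.pyGetD s ((k : Int) + 1) [] = cur := by
      have hc : ((k : Int) + 1) = ((k + 1 : Nat) : Int) := by push_cast; ring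
      rw [hc, PySem.List.pyGetD_natCast]
      exact pv_drop_getD s (k + 1) cur rest' [] hdrop
    have hlt : ((k : Int) + 1) < (s.length : Int) := by
      have hx : k + 1 < s.length := by omega
      exact_mod_cast hx
    rw [PySem.List.pyRange_one_cons hlt]
    rw [List.foldl_cons, pvAStep_eq, hcur]
    by_cases hp : prev = pvPred d_y d_x cur
    · rw [if_neg (by simpa using hp)]
      dsimp only
      obtain ⟨ih1, ih2⟩ := ih cur (k + 1) ends lens (count + 1) hdrop
      push_cast at ih1 ih2
      constructor
      · rw [ih1]
        simp [pvRuns, hp]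
      · rw [ih2]
        have he : ((k : Int) + 1) - (count + 1) = (k : Int) - count := by ring
        rw [he]
        simp [pvRuns, hp]
    · rw [if_pos (by simpa using hp)]
      dsimp only
      obtain ⟨ih1, ih2⟩ := ih cur (k + 1) (ends ++ [prev]) (lens ++ [count]) 1 hdrop
      push_cast at ih1 ih2
      constructor
      · rw [ih1, List.append_assoc]
        simp [pvRuns, hp]
      · rw [ih2, List.append_assoc]
        have he : ((k : Int) + 1) - 1 = (k : Int) := by ring
        rw [he]
        simp [pvRuns, pvDiffs, hp, sub_sub_cancel]

theorem pvB_runs (s : List (List Int)) (d_y d_x : Int) (rest : List (List Int)) :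
    ∀ (prev : List Int) (k : Nat),
    s.drop k = prev :: rest →
    ((PySem.List.pyRange ((k : Int) + 1) (s.length : Int) 1).filter (fun i =>
        decide (PySem.List.pyGetD s (i - 1) [] ≠
          [PySem.List.pyGetD (PySem.List.pyGetD s i []) 0 0 - d_y,
           PySem.List.pyGetD (PySem.List.pyGetD s i []) 1 0 - d_x]))).map
      (fun i => (i - 1, PySem.List.pyGetD s (i - 1) []))
    ++ [((s.length : Int) - 1, PySem.List.pyGetD s ((s.length : Int) - 1) [])]
    = pvRuns d_y d_x prev rest (k : Int) := by
  induction rest with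
  | nil =>
    intro prev k h
    have hk : s.length = k + 1 := by
      have h1 := congrArg List.length h
      simp [List.length_drop] at h1
      omega
    have hn : (s.length : Int) = (k : Int) + 1 := by rw [hk]; push_cast; ring
    have hprev : PySem.List.pyGetD s ((k : Int)) [] = prev := by
      rw [PySem.List.pyGetD_natCast]
      exact pv_drop_getD s k prev [] [] h
    rw [hn, PySem.List.pyRange_one_eq_nil le_rfl]
    simp [pvRuns, hprev]
  | cons cur rest' ih =>
    intro prev k h
    have hlen : k + 2 ≤ s.length := by
      have h1 := congrArg List.length h
      simp [List.length_drop] at h1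
      omega
    have hdrop : s.drop (k + 1) = cur :: rest' := by
      have h2 : s.drop (k + 1) = (s.drop k).drop 1 := by
        rw [List.drop_drop]
      rw [h2, h]; rfl
    have hprev : PySem.List.pyGetD s ((k : Int) + 1 - 1) [] = prev := by
      have hc : ((k : Int) + 1 - 1) = ((k : Nat) : Int) := by ring
      rw [hc, PySem.List.pyGetD_natCast]
      exact pv_drop_getD s k prev (cur :: rest') [] h
    have hcur : PySem.List.pyGetD s ((k : Int) + 1) [] = cur := by
      have hc : ((k : Int) + 1) = ((k + 1 : Nat) : Int) := by push_cast; ring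
      rw [hc, PySem.List.pyGetD_natCast]
      exact pv_drop_getD s (k + 1) cur rest' [] hdrop
    have hlt : ((k : Int) + 1) < (s.length : Int) := by
      have hx : k + 1 < s.length := by omega
      exact_mod_cast hx
    rw [PySem.List.pyRange_one_cons hlt]
    simp only [List.filter_cons]
    rw [hprev, hcur]
    have hIH := ih cur (k + 1) hdrop
    push_cast at hIH
    by_cases hp : prev = pvPred d_y d_x cur
    · rw [if_neg (by simp [pvPred] at hp ⊢; simp [hp])]
      rw [hIH]
      simp [pvRuns, hp]
    · rw [if_pos (by simp [pvPred] at hp ⊢; simp [hp])]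
      rw [List.map_cons, List.cons_append, hIH]
      have he : ((k : Int) + 1 - 1) = (k : Int) := by ring
      rw [hprev, he]
      simp [pvRuns, hp]

-- ===== VERDICT (by name: the statement is the Claim_ definition above) =====
theorem len_seq_and_end_coor_spec : Claim_equal_len_seq_and_end_coor := by
  intro s d_y d_x _ _
  unfold Spec_len_seq_and_end_coor
  cases s with
  | nil => rfl
  | cons p t =>
    have h0 : (p :: t).drop 0 = p :: t := rfl
    obtain ⟨a1, a2⟩ := pvA_loop (p :: t) d_y d_x t p 0 [] [] 1 h0
    have b := pvB_runs (p :: t) d_y d_x t p 0 h0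
    simp only [Nat.cast_zero, zero_add, zero_sub] at a1 a2 b
    have hA : len_seq_and_end_coor (p :: t) d_y d_x =
        ((pvRuns d_y d_x p t 0).map Prod.snd,
         pvDiffs (-1) ((pvRuns d_y d_x p t 0).map Prod.fst)) := by
      simp only [len_seq_and_end_coor]
      rw [if_pos (by simp), PySem.List.pyGetD_zero_cons]
      exact Prod.ext a1 a2
    have hB : len_seq_and_end_coor_alt (p :: t) d_y d_x =
        ((pvRuns d_y d_x p t 0).map Prod.snd,
         pvDiffs (-1) ((pvRuns d_y d_x p t 0).map Prod.fst)) := by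
      simp only [len_seq_and_end_coor_alt]
      rw [if_neg (by simp)]
      have h1 : (((PySem.List.pyRange 1 (((p :: t).length : Nat) : Int) 1).filter (fun i =>
            decide (PySem.List.pyGetD (p :: t) (i - 1) [] ≠
              [PySem.List.pyGetD (PySem.List.pyGetD (p :: t) i []) 0 0 - d_y,
               PySem.List.pyGetD (PySem.List.pyGetD (p :: t) i []) 1 0 - d_x]))).map
            (fun i => i - 1) ++ [(((p :: t).length : Nat) : Int) - 1])
          = (pvRuns d_y d_x p t 0).map Prod.fst := by
        rw [← b]
        simp [List.map_map, Function.comp]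
      rw [h1, ← pvDiffs_eq_zip]
      have h2 : ((pvRuns d_y d_x p t 0).map Prod.fst).map
            (fun bnd => PySem.List.pyGetD (p :: t) bnd []) =
          (pvRuns d_y d_x p t 0).map Prod.snd := by
        rw [← b]
        simp [List.map_map, Function.comp]
      rw [h2]
    rw [hA, hB]
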